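-- pv_equiv track=rewrite | github.com/justlebadura/proyecto-cortex-grupo-1 | backend/main.py | execution_output_has_error
-- ===== SOURCE A (Python) =====
-- def execution_output_has_error(output_text: str) -> bool:
--     t = (output_text or "").lower()
--     error_markers = [
--         "error ejecutando manim",
--         "error inesperado en manim",
--         "error en lógica",
--         "error en logica",
--         "error de ejecución",
--         "error de ejecucion",
--         "traceback",
--         "syntaxerror",
--         "nameerror",
--         "typeerror",
--         "indentationerror",
--         "modulenotfounderror",
--         "filenotfounderror",
--         "❌",
--     ]
--     return any(m in t for m in error_markers)
-- ===== SOURCE B (Python) =====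
-- # Single left-to-right scan over the lowercased text: at each position, check
-- # whether any marker starts there (instead of one full substring search per marker).
-- _ERROR_MARKERS = (
--     "error ejecutando manim",
--     "error inesperado en manim",
--     "error en lógica",
--     "error en logica",
--     "error de ejecución",
--     "error de ejecucion",
--     "traceback",
--     "syntaxerror",
--     "nameerror",
--     "typeerror",
--     "indentationerror",
--     "modulenotfounderror",
--     "filenotfounderror",
--     "❌",
-- )
--
--
-- def execution_output_has_error(output_text: str) -> bool:
--     t = (output_text or "").lower()
--     for i in range(len(t)):
--         for m in _ERROR_MARKERS:
--             if t.startswith(m, i):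
--                 return True
--     return False
-- ===== Notes on version B (the rewrite author's own statement) =====
-- stated objective: alternative
-- what changed: Replaces the per-marker substring search (any(m in t)) by a single left-to-right scan over the text that tests at each position whether any marker starts there.
import Mathlib
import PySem

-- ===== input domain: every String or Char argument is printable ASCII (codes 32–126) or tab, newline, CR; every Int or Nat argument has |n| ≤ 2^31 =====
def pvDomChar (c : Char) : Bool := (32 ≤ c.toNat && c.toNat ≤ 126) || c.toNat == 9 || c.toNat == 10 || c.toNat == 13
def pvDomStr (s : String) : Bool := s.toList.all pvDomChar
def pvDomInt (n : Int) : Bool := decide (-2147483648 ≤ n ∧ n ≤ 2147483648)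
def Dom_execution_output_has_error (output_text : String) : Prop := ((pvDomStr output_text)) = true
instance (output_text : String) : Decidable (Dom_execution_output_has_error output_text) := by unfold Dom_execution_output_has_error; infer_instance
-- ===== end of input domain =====

-- B replaces the per-marker substring search by one left-to-right positional scan; alternative structure, same cost.


-- ===== PORT A =====
-- A: lowercase, then test each marker for substring membership ('m in t').
def execution_output_has_error (output_text : String) : Bool :=
  let t := PySem.Str.lower output_text   -- (output_text or "") = output_text for a str argument
  let error_markers : List String :=
    [ "error ejecutando manim",
      "error inesperado en manim",
      "error en lógica",
      "error en logica",
      "error de ejecución",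
      "error de ejecucion",
      "traceback",
      "syntaxerror",
      "nameerror",
      "typeerror",
      "indentationerror",
      "modulenotfounderror",
      "filenotfounderror",
      "❌" ]
  error_markers.any (fun m => PySem.Str.isIn m t)

-- ===== PORT B =====
-- B: module-level tuple of markers, then one scan over the positions of the lowered text.
def pvErrorMarkers : List String :=
  [ "error ejecutando manim",
    "error inesperado en manim",
    "error en lógica",
    "error en logica",
    "error de ejecución",
    "error de ejecucion",
    "traceback",
    "syntaxerror",
    "nameerror",
    "typeerror",
    "indentationerror",
    "modulenotfounderror",
    "filenotfounderror",
    "❌" ]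

def execution_output_has_error_alt (output_text : String) : Bool :=
  let t := PySem.Str.lower output_text
  -- 't.startswith(m, i)' is ported exactly as: m.toList is a prefix of t.toList.drop i
  (List.range t.toList.length).any (fun i =>
    pvErrorMarkers.any (fun m => PySem.Chars.startswith (t.toList.drop i) m.toList))

-- ===== PRECONDITION & SPEC =====
def Spec_execution_output_has_error (output_text : String) (out : Bool) : Prop := out = execution_output_has_error_alt output_text
instance (output_text : String) (out : Bool) : Decidable (Spec_execution_output_has_error output_text out) := by unfold Spec_execution_output_has_error; infer_instance

-- ===== CLAIM (what is proved, stated in full; the proofs are below) =====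
def Claim_equal_execution_output_has_error : Prop := ∀ (output_text : String), Dom_execution_output_has_error output_text → Spec_execution_output_has_error output_text (execution_output_has_error output_text)

-- ===== LEMMAS AND PROOFS =====

lemma pvErrorMarkers_ne_nil : ∀ m ∈ pvErrorMarkers, m.toList ≠ [] := by decide

-- core: per-marker infix test = positional scan, for any text cs
lemma pv_scan_eq (cs : List Char) :
    pvErrorMarkers.any (fun m => PySem.Chars.isIn m.toList cs)
      = (List.range cs.length).any (fun i =>
          pvErrorMarkers.any (fun m => PySem.Chars.startswith (cs.drop i) m.toList)) := by
  rw [Bool.eq_iff_iff]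
  simp only [List.any_eq_true, List.mem_range, PySem.Chars.isIn_iff_infix,
    PySem.Chars.startswith_iff]
  constructor
  · rintro ⟨m, hm, hinf⟩
    have hj : ∃ j, m.toList <+: cs.drop j := by
      rw [PySem.Chars.exists_prefix_drop_iff_isIn, PySem.Chars.isIn_iff_infix]
      exact hinf
    obtain ⟨j, hj⟩ := hj
    refine ⟨j, ?_, m, hm, hj⟩
    by_contra h
    rw [List.drop_eq_nil_of_le (Nat.le_of_not_lt h)] at hj
    exact pvErrorMarkers_ne_nil m hm (List.prefix_nil.mp hj)
  · rintro ⟨i, _, m, hm, hp⟩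
    exact ⟨m, hm, hp.isInfix.trans (List.drop_suffix i cs).isInfix⟩

-- ===== VERDICT (by name: the statement is the Claim_ definition above) =====
theorem execution_output_has_error_spec : Claim_equal_execution_output_has_error := by
  intro s _
  unfold Spec_execution_output_has_error execution_output_has_error execution_output_has_error_alt
  simp only [PySem.Str.isIn_eq]
  exact pv_scan_eq (PySem.Str.lower s).toList
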